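-- pv_equiv track=rewrite | github.com/HRishabh95/CREDPASS | read_portal.py | process_treat_il
-- ===== SOURCE A (Python) =====
-- def process_treat_il(rows):
--     if type(rows['treat_il']) is str:
--         symp_il = []
--         sympsi = rows['treat_il'].split("..")
--         for symps in sympsi:
--             for symp in symps.split("."):
--                 if len(symp.split())<8 and len(symp)!=0:
--                     symp_il.append(f'''{rows['disease_name']} can be treated by {symp}''')
--         #symp_il = ".".join(symp_il)
--         return symp_il
--     else:
--         return []
-- ===== SOURCE B (Python) =====
-- def process_treat_il(rows):
--     treat = rows['treat_il']
--     if type(treat) is not str: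
--         return []
--     out = []
--     buf = []
--     for ch in treat + '.':
--         if ch == '.':
--             tok = ''.join(buf)
--             buf = []
--             if tok and len(tok.split()) < 8:
--                 out.append(f"{rows['disease_name']} can be treated by {tok}")
--         else:
--             buf.append(ch)
--     return out
-- ===== Notes on version B (the rewrite author's own statement) =====
-- stated objective: alternative
-- what changed: B replaces A's nested split('..')/split('.') passes by a single character-level scan with an explicit token buffer that flushes at every '.', filtering and formatting each token as it is emitted; no split-on-separator call remains.
-- outside the precondition, e.g. on process_treat_il({}): A raises KeyError, B raises KeyError; on process_treat_il({'treat_il': 'x'}): A raises KeyError, B raises KeyError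
import Mathlib
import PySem

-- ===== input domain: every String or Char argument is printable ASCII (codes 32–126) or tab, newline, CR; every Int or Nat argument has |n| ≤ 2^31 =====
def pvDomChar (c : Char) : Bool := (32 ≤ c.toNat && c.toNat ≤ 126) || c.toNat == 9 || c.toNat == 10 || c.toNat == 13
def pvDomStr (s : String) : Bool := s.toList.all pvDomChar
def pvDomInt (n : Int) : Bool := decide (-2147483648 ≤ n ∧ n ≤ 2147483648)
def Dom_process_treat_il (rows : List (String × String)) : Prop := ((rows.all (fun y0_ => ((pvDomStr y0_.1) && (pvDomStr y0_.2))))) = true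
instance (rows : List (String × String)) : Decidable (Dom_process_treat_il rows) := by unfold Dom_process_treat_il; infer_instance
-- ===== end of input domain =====

-- B replaces A's nested split("..")/split(".") passes by a single character-level scan with an
-- explicit token buffer flushed at every '.' (objective: alternative, same cost).


-- ===== PORT A =====
-- dict[str, str] is the association list `rows`; rows[k] is the first match (KeyError = none).
def pyKey? (rows : List (String × String)) (k : String) : Option String :=
  match rows with
  | [] => none
  | (k', v) :: rest => if k' = k then some v else pyKey? rest k

-- literal port of A: nested loops over split("..") then split("."), appending the f-string.
-- (`type(rows['treat_il']) is str` is always true for a str-valued dict, so that guard is the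
--  `some` branch; a missing key raises KeyError in Python — those inputs are outside Pre_.)
def process_treat_il (rows : List (String × String)) : List String :=
  match pyKey? rows "treat_il" with
  | some tl =>
      ((PySem.Str.split? tl "..").getD []).foldl (fun symp_il symps =>
        ((PySem.Str.split? symps ".").getD []).foldl (fun symp_il symp =>
          if (decide ((PySem.Str.split₀ symp).length < 8) && PySem.Str.len symp != 0) = true then
            symp_il ++ [((pyKey? rows "disease_name").getD "") ++ " can be treated by " ++ symp]
          else symp_il) symp_il) []
  | none => []

-- ===== PORT B =====
-- literal port of B: one fold over the characters of treat + '.', state = (out, buf);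
-- '.' flushes buf as a token (''.join(buf) = String.ofList buf), any other char extends buf.
def bstep (rows : List (String × String)) (st : List String × List Char) (ch : Char) :
    List String × List Char :=
  if ch = '.' then
    let tok := String.ofList st.2
    if (PySem.Str.len tok != 0 && decide ((PySem.Str.split₀ tok).length < 8)) = true then
      (st.1 ++ [((pyKey? rows "disease_name").getD "") ++ " can be treated by " ++ tok], [])
    else (st.1, [])
  else (st.1, st.2 ++ [ch])

def process_treat_il_alt (rows : List (String × String)) : List String :=
  match pyKey? rows "treat_il" with
  | some treat =>
      ((treat.toList ++ ['.']).foldl (bstep rows) (([], []) : List String × List Char)).1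
  | none => []

-- ===== PRECONDITION & SPEC =====
-- Pre_ = exactly the inputs where A returns: the key 'treat_il' exists, and 'disease_name'
-- exists unless no token of the treatment text passes the filter (then A returns [] lazily,
-- never touching 'disease_name'); on every input outside Pre_ Python raises KeyError.
def Pre_process_treat_il (rows : List (String × String)) : Prop :=
  "treat_il" ∈ rows.map Prod.fst ∧
    ("disease_name" ∈ rows.map Prod.fst ∨
      ∀ t ∈ (PySem.Str.split? ((List.lookup "treat_il" rows).getD "") ".").getD [],
        PySem.Str.len t = 0 ∨ 8 ≤ (PySem.Str.split₀ t).length)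
instance (rows : List (String × String)) : Decidable (Pre_process_treat_il rows) := by
  unfold Pre_process_treat_il; infer_instance

def pvWitness_process_treat_il : (List (String × String)) :=
  [("treat_il", "rest..drink water.a b c d e f g h"), ("disease_name", "flu")]

def Spec_process_treat_il (rows : List (String × String)) (out : List String) : Prop := out = process_treat_il_alt rows
instance (rows : List (String × String)) (out : List String) : Decidable (Spec_process_treat_il rows out) := by unfold Spec_process_treat_il; infer_instance

-- ===== CLAIM (what is proved, stated in full; the proofs are below) =====
def Claim_equal_process_treat_il : Prop := ∀ (rows : List (String × String)), Dom_process_treat_il rows → Pre_process_treat_il rows → Spec_process_treat_il rows (process_treat_il rows)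

-- ===== LEMMAS AND PROOFS =====
def consHead (p : List Char) : List (List Char) → List (List Char)
  | [] => [p]
  | t :: ts => (p ++ t) :: ts
def splitD : List Char → List (List Char)
  | [] => [[]]
  | c :: rest => if c = '.' then [] :: splitD rest else consHead [c] (splitD rest)
theorem splitD_ne_nil (l : List Char) : splitD l ≠ [] := by
  induction l with
  | nil => simp [splitD]
  | cons c rest ih =>
      simp only [splitD]; split
      · simp
      · cases h : splitD rest <;> simp [consHead]
theorem consHead_consHead (p q : List Char) (X : List (List Char)) :
    consHead p (consHead q X) = consHead (p ++ q) X := by cases X <;> simp [consHead]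
theorem consHead_nil (X : List (List Char)) (h : X ≠ []) : consHead [] X = X := by
  cases X with
  | nil => exact absurd rfl h
  | cons t ts => simp [consHead]
theorem goD_eq (fuel : ℕ) (l cur : List Char) (acc : List (List Char)) (h : l.length < fuel) :
    PySem.Chars.splitOn.go ['.'] fuel l cur acc = acc.reverse ++ consHead cur.reverse (splitD l) := by
  induction fuel generalizing l cur acc with
  | zero => omega
  | succ fuel ih =>
      cases l with
      | nil =>
          rw [PySem.Chars.splitOn.go]
          · simp [splitD, consHead]
          · omega
      | cons c rest =>
          rw [PySem.Chars.splitOn.go]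
          by_cases hc : c = '.'
          · subst hc
            rw [if_pos (by simp [List.isPrefixOf])]
            rw [ih _ [] _ (by simp at h ⊢; omega)]
            rw [List.reverse_nil, consHead_nil _ (splitD_ne_nil _)]
            simp [splitD, consHead]
          · rw [if_neg (by simp [List.isPrefixOf_cons₂]; intro hh; exact absurd hh.symm hc)]
            rw [ih rest (c :: cur) acc (by simp at h ⊢; omega)]
            simp only [List.reverse_cons, splitD, if_neg hc]
            rw [consHead_consHead]

def splitDD : List Char → List (List Char)
  | [] => [[]]
  | c :: rest =>
      if ['.', '.'].isPrefixOf (c :: rest) then [] :: splitDD (rest.drop 1)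
      else consHead [c] (splitDD rest)
termination_by l => l.length
decreasing_by all_goals (simp; try omega)

theorem splitDD_ne_nil (l : List Char) : splitDD l ≠ [] := by
  induction l using splitDD.induct with
  | case1 => simp [splitDD]
  | case2 c rest h ih => simp [splitDD, h]
  | case3 c rest h ih =>
      rw [splitDD, if_neg h]
      cases hs : splitDD rest <;> simp [consHead]

theorem goDD_eq (fuel : ℕ) (l cur : List Char) (acc : List (List Char)) (h : l.length < fuel) :
    PySem.Chars.splitOn.go ['.', '.'] fuel l cur acc = acc.reverse ++ consHead cur.reverse (splitDD l) := by
  induction fuel generalizing l cur acc with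
  | zero => omega
  | succ fuel ih =>
      cases l with
      | nil =>
          rw [PySem.Chars.splitOn.go]
          · simp [splitDD, consHead]
          · omega
      | cons c rest =>
          rw [PySem.Chars.splitOn.go]
          by_cases hp : List.isPrefixOf ['.', '.'] (c :: rest) = true
          · rw [if_pos hp]
            have hlen : (rest.drop 1).length < fuel := by
              simp at h ⊢; omega
            rw [show List.drop (['.','.'].length) (c :: rest) = rest.drop 1 from by simp]
            rw [ih _ [] _ hlen]
            rw [List.reverse_nil, consHead_nil _ (splitDD_ne_nil _)]
            rw [splitDD, if_pos hp]
            simp [consHead]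
          · rw [if_neg hp]
            rw [ih rest (c :: cur) acc (by simp at h ⊢; omega)]
            rw [splitDD, if_neg hp]
            simp only [List.reverse_cons]
            rw [consHead_consHead]

theorem splitOn_dot (l : List Char) : PySem.Chars.splitOn l ['.'] = splitD l := by
  unfold PySem.Chars.splitOn
  rw [goD_eq _ _ _ _ (by omega)]
  simp [consHead_nil _ (splitD_ne_nil l)]

theorem splitOn_dotdot (l : List Char) : PySem.Chars.splitOn l ['.', '.'] = splitDD l := by
  unfold PySem.Chars.splitOn
  rw [goDD_eq _ _ _ _ (by omega)]
  simp [consHead_nil _ (splitDD_ne_nil l)]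


def filterNE (X : List (List Char)) : List (List Char) := X.filter (fun t => !t.isEmpty)

theorem flatMap_splitD_ne_nil (X : List (List Char)) (h : X ≠ []) :
    X.flatMap splitD ≠ [] := by
  cases X with
  | nil => exact absurd rfl h
  | cons t ts =>
      simp only [List.flatMap_cons, ne_eq, List.append_eq_nil_iff, not_and]
      intro hs; exact absurd hs (splitD_ne_nil t)

theorem filterNE_eq_of_head_tail (X Y : List (List Char)) (hX : X ≠ []) (hY : Y ≠ [])
    (hh : X.head? = Y.head?) (ht : filterNE X.tail = filterNE Y.tail) :
    filterNE X = filterNE Y := by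
  cases X with
  | nil => exact absurd rfl hX
  | cons x xs =>
      cases Y with
      | nil => exact absurd rfl hY
      | cons y ys =>
          simp only [List.head?_cons, Option.some_inj] at hh
          subst hh
          simp only [List.tail_cons] at ht
          simp only [filterNE, List.filter_cons] at *
          split <;> simp [ht]

theorem splitD_dot (rest : List Char) : splitD ('.' :: rest) = [] :: splitD rest := by
  simp [splitD]

theorem splitD_ne_dot (c : Char) (rest : List Char) (hc : c ≠ '.') :
    splitD (c :: rest) = consHead [c] (splitD rest) := by
  simp [splitD, hc]

theorem splitDD_pre (c : Char) (rest : List Char) (h : ['.','.'].isPrefixOf (c :: rest) = true) :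
    splitDD (c :: rest) = [] :: splitDD (rest.drop 1) := by
  rw [splitDD, if_pos h]

theorem splitDD_npre (c : Char) (rest : List Char) (h : ¬ ['.','.'].isPrefixOf (c :: rest) = true) :
    splitDD (c :: rest) = consHead [c] (splitDD rest) := by
  rw [splitDD, if_neg h]

theorem filterNE_nil_cons (X : List (List Char)) : filterNE ([] :: X) = filterNE X := by
  simp [filterNE]

theorem ex_cons_of_ne_nil (X : List (List Char)) (h : X ≠ []) : ∃ t ts, X = t :: ts := by
  cases X with
  | nil => exact absurd rfl h
  | cons a b => exact ⟨a, b, rfl⟩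

theorem split_inv (cs : List Char) :
    ((splitDD cs).flatMap splitD).head? = (splitD cs).head? ∧
    filterNE ((splitDD cs).flatMap splitD).tail = filterNE (splitD cs).tail := by
  induction cs using splitDD.induct with
  | case1 => simp [splitDD, splitD]
  | case2 c rest h ih =>
      cases rest with
      | nil => simp [List.isPrefixOf] at h
      | cons d rs =>
          obtain ⟨hc, hd⟩ : c = '.' ∧ d = '.' := by
            simp [List.isPrefixOf_cons₂] at h
            exact ⟨h.1.symm, h.2.symm⟩
          subst hc; subst hd
          simp only [List.drop_succ_cons, List.drop_zero] at ih
          have hfull : filterNE ((splitDD rs).flatMap splitD) = filterNE (splitD rs) :=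
            filterNE_eq_of_head_tail _ _ (flatMap_splitD_ne_nil _ (splitDD_ne_nil _))
              (splitD_ne_nil _) ih.1 ih.2
          rw [splitDD_pre _ _ h]
          simp only [List.drop_succ_cons, List.drop_zero, List.flatMap_cons, splitD_dot]
          constructor
          · simp [splitD]
          · simp only [List.tail_cons]
            show filterNE ((splitDD rs).flatMap splitD) = filterNE ([] :: splitD rs)
            rw [filterNE_nil_cons, hfull]
  | case3 c rest h ih =>
      have hfull : filterNE ((splitDD rest).flatMap splitD) = filterNE (splitD rest) :=
        filterNE_eq_of_head_tail _ _ (flatMap_splitD_ne_nil _ (splitDD_ne_nil _))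
          (splitD_ne_nil _) ih.1 ih.2
      obtain ⟨t0, ts0, hs⟩ := ex_cons_of_ne_nil _ (splitDD_ne_nil rest)
      rw [splitDD_npre _ _ h, hs]
      simp only [consHead, List.flatMap_cons, List.singleton_append]
      by_cases hc : c = '.'
      · subst hc
        rw [splitD_dot, splitD_dot]
        have hflat : splitD t0 ++ ts0.flatMap splitD = (splitDD rest).flatMap splitD := by
          rw [hs, List.flatMap_cons]
        constructor
        · simp
        · simp only [List.cons_append, List.tail_cons, hflat]
          exact hfull
      · rw [splitD_ne_dot _ _ hc, splitD_ne_dot _ _ hc]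
        obtain ⟨u, us, hu⟩ := ex_cons_of_ne_nil _ (splitD_ne_nil t0)
        obtain ⟨v, vs, hv⟩ := ex_cons_of_ne_nil _ (splitD_ne_nil rest)
        have ih1 := ih.1
        have ih2 := ih.2
        rw [hs, List.flatMap_cons, hu, hv] at ih1 ih2
        simp only [List.cons_append, List.head?_cons, List.tail_cons] at ih1 ih2
        rw [hu, hv]
        simp only [consHead, List.cons_append, List.head?_cons, List.tail_cons]
        exact ⟨by rw [Option.some_inj] at ih1 ⊢; rw [ih1], ih2⟩

theorem tokens_eq (cs : List Char) :
    filterNE ((splitDD cs).flatMap splitD) = filterNE (splitD cs) :=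
  filterNE_eq_of_head_tail _ _ (flatMap_splitD_ne_nil _ (splitDD_ne_nil _)) (splitD_ne_nil _)
    (split_inv cs).1 (split_inv cs).2

theorem filter_tokens_eq (Q : List Char → Bool) (hQ : ∀ t, Q t = true → t ≠ []) (cs : List Char) :
    ((splitDD cs).flatMap splitD).filter Q = (splitD cs).filter Q := by
  have key : ∀ X : List (List Char), X.filter Q = (filterNE X).filter Q := by
    intro X
    rw [filterNE, List.filter_filter]
    apply List.filter_congr
    intro t _
    by_cases h : Q t = true
    · have := hQ t h; simp [h, this]
    · simp [Bool.eq_false_iff.mpr h]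
  rw [key, key (splitD cs), tokens_eq]

theorem split_getD_map (s sep : String) (h : sep.toList ≠ []) :
    ((PySem.Str.split? s sep).getD []).map String.toList = PySem.Chars.splitOn s.toList sep.toList := by
  have hb := PySem.Str.split?_map s sep
  unfold PySem.Chars.split? at hb
  rw [if_neg (by simpa using h)] at hb
  cases hx : PySem.Str.split? s sep with
  | none => rw [hx] at hb; simp at hb
  | some xs => rw [hx] at hb; simpa using hb

def tokQ (t : List Char) : Bool := decide ((PySem.Chars.split₀ t).length < 8) && !t.isEmpty

theorem tokQ_eq (s : String) :
    (decide ((PySem.Str.split₀ s).length < 8) && PySem.Str.len s != 0) = tokQ s.toList := by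
  have h1 : (PySem.Str.split₀ s).length = (PySem.Chars.split₀ s.toList).length := by
    rw [← PySem.Str.split₀_map_toList, List.length_map]
  have h2 : (PySem.Str.len s != 0) = !s.toList.isEmpty := by
    rw [PySem.Str.len_eq]
    cases s.toList with
    | nil => simp
    | cons a t => simp; omega
  simp only [tokQ, h1, h2]

theorem hQ_tokQ (t : List Char) : tokQ t = true → t ≠ [] := by
  intro h
  rw [tokQ, Bool.and_eq_true] at h
  cases t with
  | nil => simp at h
  | cons a b => simp

theorem toList_injective : Function.Injective String.toList := by
  intro a b h
  have := congrArg String.ofList h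
  simpa using this

theorem map_filter_toList (X : List String) (q : List Char → Bool) :
    (X.filter (fun t => q t.toList)).map String.toList = (X.map String.toList).filter q := by
  rw [List.filter_map]; rfl

-- the common middle form: filter-then-map over the single split(".") of the treatment text
def eMid (rows : List (String × String)) (tl : String) : List String :=
  (((PySem.Str.split? tl ".").getD []).filter
      (fun part => PySem.Str.len part != 0 && decide ((PySem.Str.split₀ part).length < 8))).map
    (fun part => ((pyKey? rows "disease_name").getD "") ++ " can be treated by " ++ part)

theorem filtered_tokens (tl : String) :
    ((((PySem.Str.split? tl "..").getD []).flatMap (fun t => (PySem.Str.split? t ".").getD [])).filter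
        (fun t => decide ((PySem.Str.split₀ t).length < 8) && PySem.Str.len t != 0))
      = (((PySem.Str.split? tl ".").getD []).filter
        (fun t => PySem.Str.len t != 0 && decide ((PySem.Str.split₀ t).length < 8))) := by
  apply (List.map_injective_iff (f := String.toList)).mpr toList_injective
  have hp1 : (fun t => decide ((PySem.Str.split₀ t).length < 8) && PySem.Str.len t != 0)
      = (fun t : String => tokQ t.toList) := funext tokQ_eq
  have hp2 : (fun t => PySem.Str.len t != 0 && decide ((PySem.Str.split₀ t).length < 8))
      = (fun t : String => tokQ t.toList) := by
    funext t; rw [Bool.and_comm, tokQ_eq]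
  rw [hp1, hp2, map_filter_toList, map_filter_toList]
  have hflat : (((PySem.Str.split? tl "..").getD []).flatMap
        (fun t => (PySem.Str.split? t ".").getD [])).map String.toList
      = (splitDD tl.toList).flatMap splitD := by
    rw [List.map_flatMap]
    have : ∀ t : String, ((PySem.Str.split? t ".").getD []).map String.toList = splitD t.toList := by
      intro t
      rw [split_getD_map t "." (by decide)]
      exact splitOn_dot t.toList
    calc (((PySem.Str.split? tl "..").getD [])).flatMap
            (fun t => ((PySem.Str.split? t ".").getD []).map String.toList)
        = (((PySem.Str.split? tl "..").getD [])).flatMap (fun t => splitD t.toList) := by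
          simp only [this]
      _ = ((((PySem.Str.split? tl "..").getD [])).map String.toList).flatMap splitD := by
          rw [List.flatMap_map]
      _ = (splitDD tl.toList).flatMap splitD := by
          rw [split_getD_map tl ".." (by decide), show ("..".toList) = ['.','.'] from rfl, splitOn_dotdot]
  have hsingle : ((PySem.Str.split? tl ".").getD []).map String.toList = splitD tl.toList := by
    rw [split_getD_map tl "." (by decide), show (".".toList) = ['.'] from rfl, splitOn_dot]
  rw [hflat, hsingle]
  exact filter_tokens_eq tokQ hQ_tokQ tl.toList

theorem filter_flatMap_comm {α β : Type} (p : β → Bool) (g : α → List β)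
    (l : List α) :
    (l.flatMap g).filter p = l.flatMap (fun a => (g a).filter p) := by
  induction l with
  | nil => rfl
  | cons x xs ih => simp [List.filter_append, ih]

-- A's side: nested folds = the middle form
theorem A_eq_mid (rows : List (String × String)) (tl : String)
    (htl : pyKey? rows "treat_il" = some tl) :
    process_treat_il rows = eMid rows tl := by
  unfold process_treat_il eMid
  rw [htl]
  simp only [PySem.List.foldl_append_if, PySem.List.foldl_append_eq_flatMap, List.nil_append]
  rw [← List.map_flatMap, ← filter_flatMap_comm]
  rw [filtered_tokens tl]

-- B's side: the character scan = the middle form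
theorem bstep_dot (rows : List (String × String)) (out : List String) (buf : List Char) :
    bstep rows (out, buf) '.' =
      if (PySem.Str.len (String.ofList buf) != 0 &&
          decide ((PySem.Str.split₀ (String.ofList buf)).length < 8)) = true then
        (out ++ [((pyKey? rows "disease_name").getD "") ++ " can be treated by " ++ String.ofList buf], [])
      else (out, []) := by
  simp [bstep]

theorem bstep_ne (rows : List (String × String)) (out : List String) (buf : List Char)
    (c : Char) (hc : ¬ c = '.') : bstep rows (out, buf) c = (out, buf ++ [c]) := by
  simp [bstep, hc]

theorem bscan_eq (rows : List (String × String)) (cs : List Char) :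
    ∀ (out : List String) (buf : List Char),
    ((cs ++ ['.']).foldl (bstep rows) (out, buf)).1
      = out ++ ((consHead buf (splitD cs)).filter
            (fun t => PySem.Str.len (String.ofList t) != 0 &&
              decide ((PySem.Str.split₀ (String.ofList t)).length < 8))).map
          (fun t => ((pyKey? rows "disease_name").getD "") ++ " can be treated by " ++ String.ofList t) := by
  induction cs with
  | nil =>
      intro out buf
      rw [List.nil_append, List.foldl_cons, List.foldl_nil, bstep_dot]
      simp only [splitD, consHead, List.append_nil, List.filter_cons, List.filter_nil]
      split <;> simp_all
  | cons c rest ih =>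
      intro out buf
      by_cases hc : c = '.'
      · subst hc
        rw [List.cons_append, List.foldl_cons, bstep_dot, splitD_dot]
        simp only [consHead]
        split
        · rw [ih _ []]
          rw [consHead_nil _ (splitD_ne_nil rest)]
          simp_all [List.append_nil, List.append_assoc]
        · rw [ih _ []]
          rw [consHead_nil _ (splitD_ne_nil rest)]
          simp_all [List.append_nil]
      · rw [List.cons_append, List.foldl_cons, bstep_ne _ _ _ _ hc]
        rw [ih _ (buf ++ [c])]
        rw [splitD_ne_dot _ _ hc, consHead_consHead]

theorem B_eq_mid (rows : List (String × String)) (tl : String)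
    (htl : pyKey? rows "treat_il" = some tl) :
    process_treat_il_alt rows = eMid rows tl := by
  unfold process_treat_il_alt
  rw [htl]
  show ((tl.toList ++ ['.']).foldl (bstep rows) ([], [])).1 = eMid rows tl
  rw [bscan_eq rows tl.toList [] []]
  rw [consHead_nil _ (splitD_ne_nil _), List.nil_append]
  unfold eMid
  have hsingle : ((PySem.Str.split? tl ".").getD []).map String.toList = splitD tl.toList := by
    rw [split_getD_map tl "." (by decide), show (".".toList) = ['.'] from rfl, splitOn_dot]
  rw [← hsingle]
  rw [← map_filter_toList, List.map_map]
  congr 1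
  · funext s
    simp
  · apply List.filter_congr
    intro s _
    simp

theorem pyKey?_isSome_of_mem (rows : List (String × String)) (k : String)
    (h : k ∈ rows.map Prod.fst) : ∃ v, pyKey? rows k = some v := by
  induction rows with
  | nil => simp at h
  | cons p rest ih =>
      by_cases hk : p.1 = k
      · exact ⟨p.2, by rw [pyKey?, if_pos hk]⟩
      · obtain ⟨v, hv⟩ := ih (by
          simp only [List.map_cons, List.mem_cons] at h
          rcases h with h | h
          · exact absurd h.symm hk
          · simpa using h)
        exact ⟨v, by rw [pyKey?]; rw [if_neg hk]; exact hv⟩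

-- ===== VERDICT (by name: the statement is the Claim_ definition above) =====
theorem process_treat_il_spec : Claim_equal_process_treat_il := by
  intro rows _ hpre
  unfold Spec_process_treat_il
  obtain ⟨tl, htl⟩ := pyKey?_isSome_of_mem rows "treat_il" hpre.1
  rw [A_eq_mid rows tl htl, B_eq_mid rows tl htl]
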